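-- pv_equiv track=rewrite | github.com/jasonwang7517/Interview-Prep | CheckIfBinaryStringHasAtMostOneSegmentOfOnes.py | checkOnesSegment
-- ===== SOURCE A (Python) =====
-- def checkOnesSegment(s):
--     contiguous = False
--     total_segs = 0
--     for i in s:
--         if i == '1' and not contiguous:
--             total_segs += 1
--             contiguous = True
--         if i == '0' and contiguous:
--             contiguous = False
--     return total_segs <= 1
-- ===== SOURCE B (Python) =====
-- def checkOnesSegment(s):
--     segments = [g for g in s.split('0') if '1' in g]
--     return len(segments) <= 1
-- ===== Notes on version B (the rewrite author's own statement) =====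
-- stated objective: simpler
-- what changed: Replaced the stateful flag-and-counter scan by partitioning the string at zero characters and counting the groups that contain a one; the partition runs in C-level str.split instead of a per-character Python loop.
import Mathlib
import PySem

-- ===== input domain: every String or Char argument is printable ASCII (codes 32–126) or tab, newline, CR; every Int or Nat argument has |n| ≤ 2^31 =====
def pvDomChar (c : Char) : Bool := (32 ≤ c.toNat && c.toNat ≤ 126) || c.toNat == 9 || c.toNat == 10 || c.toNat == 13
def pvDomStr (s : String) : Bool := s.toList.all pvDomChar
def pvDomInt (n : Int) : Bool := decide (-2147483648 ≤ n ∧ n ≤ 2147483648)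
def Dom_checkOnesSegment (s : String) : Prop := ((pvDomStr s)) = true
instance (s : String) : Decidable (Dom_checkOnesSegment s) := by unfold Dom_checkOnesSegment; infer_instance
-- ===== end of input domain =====

-- B replaces A's stateful flag-and-counter scan by partitioning the string at zero
-- characters and counting the groups that contain a one (objective: simpler).

-- ===== PORT A =====
-- literal transliteration of A: one pass with a `contiguous` flag and a counter
def checkOnesSegment (s : String) : Bool :=
  let st := s.toList.foldl
    (fun (st : Bool × Int) i =>
      let st1 := if i == '1' && !st.1 then (true, st.2 + 1) else st
      if i == '0' && st1.1 then (false, st1.2) else st1)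
    (false, 0)
  decide (st.2 ≤ 1)

-- ===== PORT B =====
-- s.split('0') with the nonempty literal separator → PySem.Chars.splitOn (the sep ≠ "" form);
-- '1' in g → PySem.Chars.isIn
def checkOnesSegment_alt (s : String) : Bool :=
  let segments := (PySem.Chars.splitOn s.toList ['0']).filter (fun g => PySem.Chars.isIn ['1'] g)
  decide (segments.length ≤ 1)

-- ===== PRECONDITION & SPEC =====
def Spec_checkOnesSegment (s : String) (out : Bool) : Prop := out = checkOnesSegment_alt s
instance (s : String) (out : Bool) : Decidable (Spec_checkOnesSegment s out) := by unfold Spec_checkOnesSegment; infer_instance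

-- ===== CLAIM (what is proved, stated in full; the proofs are below) =====
def Claim_equal_checkOnesSegment : Prop := ∀ (s : String), Dom_checkOnesSegment s → Spec_checkOnesSegment s (checkOnesSegment s)

-- ===== LEMMAS AND PROOFS =====

-- clean structural recursion equivalent to splitOn.go on the single separator '0'
def pvSplit (pre : List Char) : List Char → List (List Char)
  | [] => [pre]
  | c :: rest => if c = '0' then pre :: pvSplit [] rest else pvSplit (pre ++ [c]) rest

-- the Int-valued count of '1'-segments computed by A's loop from flag state b
def pvCount (b : Bool) : List Char → Int
  | [] => 0
  | c :: rest =>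
    if c = '1' ∧ b = false then 1 + pvCount true rest
    else if c = '0' then pvCount false rest
    else pvCount b rest

theorem go_eq_pvSplit : ∀ (fuel : Nat) (l cur : List Char) (accs : List (List Char)),
    l.length < fuel →
    PySem.Chars.splitOn.go ['0'] fuel l cur accs = accs.reverse ++ pvSplit cur.reverse l := by
  intro fuel
  induction fuel with
  | zero => intro l cur accs h; omega
  | succ n ih =>
    intro l cur accs h
    cases l with
    | nil => simp [PySem.Chars.splitOn.go, pvSplit]
    | cons c rest =>
      rw [PySem.Chars.splitOn.go]
      by_cases hc : c = '0'
      · subst hc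
        simp only [List.isPrefixOf, Bool.and_true, beq_self_eq_true,
          if_pos]
        rw [ih _ _ _ (by simpa using Nat.lt_of_succ_lt_succ h)]
        simp [pvSplit]
      · have hb : (['0'].isPrefixOf (c :: rest)) = false := by
          simp [List.isPrefixOf]; exact fun hx => hc hx.symm
        simp only [hb, Bool.false_eq_true, ite_false]
        rw [ih _ _ _ (by simpa using Nat.lt_of_succ_lt_succ h)]
        simp [pvSplit, hc]

theorem splitOn_eq_pvSplit (cs : List Char) :
    PySem.Chars.splitOn cs ['0'] = pvSplit [] cs := by
  have := go_eq_pvSplit (cs.length + 1) cs [] [] (Nat.lt_succ_self _)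
  simpa [PySem.Chars.splitOn] using this

theorem singleton_infix_iff (a : Char) (l : List Char) : [a] <:+: l ↔ a ∈ l := by
  constructor
  · intro h; exact h.sublist.subset (List.mem_singleton_self a)
  · intro h
    obtain ⟨s, t, rfl⟩ := List.append_of_mem h
    exact ⟨s, t, by simp⟩

theorem isIn_one (g : List Char) : PySem.Chars.isIn ['1'] g = decide ('1' ∈ g) := by
  by_cases h : '1' ∈ g
  · simp [h, PySem.Chars.isIn_iff_infix, singleton_infix_iff]
  · simp [h]
    rw [PySem.Chars.isIn_eq_false_iff, singleton_infix_iff]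
    exact h

theorem pvCount_filter : ∀ (cs : List Char) (b : Bool) (pre : List Char),
    b = decide ('1' ∈ pre) →
    (if b then 1 else 0) + pvCount b cs
      = (((pvSplit pre cs).filter (fun g => decide ('1' ∈ g))).length : Int) := by
  intro cs
  induction cs with
  | nil =>
    intro b pre hb; subst hb
    by_cases h : '1' ∈ pre <;> simp [pvCount, pvSplit, List.filter, h]
  | cons c rest ih =>
    intro b pre hb
    by_cases h1 : c = '1'
    · subst h1
      have e2 : pvSplit pre ('1' :: rest) = pvSplit (pre ++ ['1']) rest := by simp [pvSplit]
      have h2 := ih true (pre ++ ['1']) (by simp)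
      cases b with
      | false =>
        have e1 : pvCount false ('1' :: rest) = 1 + pvCount true rest := by simp [pvCount]
        rw [e1, e2]; simp at h2 ⊢; omega
      | true =>
        have e1 : pvCount true ('1' :: rest) = pvCount true rest := by simp [pvCount]
        rw [e1, e2]; simpa using h2
    · by_cases h0 : c = '0'
      · subst h0
        have e1 : pvCount b ('0' :: rest) = pvCount false rest := by
          cases b <;> simp [pvCount]
        have e2 : pvSplit pre ('0' :: rest) = pre :: pvSplit [] rest := by simp [pvSplit]
        have h2 := ih false [] (by simp)
        rw [e1, e2]
        by_cases hm : '1' ∈ pre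
        · simp only [hm, decide_true] at hb; subst hb
          simp [List.filter, hm] at h2 ⊢; omega
        · simp only [hm, decide_false] at hb; subst hb
          simp [List.filter, hm] at h2 ⊢; omega
      · have hb' : b = decide ('1' ∈ pre ++ [c]) := by
          have hc : ¬ ('1' : Char) = c := fun hx => h1 hx.symm
          simp [hb, hc]
        have e1 : pvCount b (c :: rest) = pvCount b rest := by simp [pvCount, h1, h0]
        have e2 : pvSplit pre (c :: rest) = pvSplit (pre ++ [c]) rest := by simp [pvSplit, h0]
        rw [e1, e2]
        exact ih b (pre ++ [c]) hb'

theorem foldl_eq_pvCount : ∀ (cs : List Char) (b : Bool) (t : Int),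
    (cs.foldl
      (fun (st : Bool × Int) i =>
        let st1 := if i == '1' && !st.1 then (true, st.2 + 1) else st
        if i == '0' && st1.1 then (false, st1.2) else st1) (b, t)).2
      = t + pvCount b cs := by
  intro cs
  induction cs with
  | nil => intro b t; simp [pvCount]
  | cons c rest ih =>
    intro b t
    rw [List.foldl_cons]
    by_cases h1 : c = '1'
    · subst h1
      cases b with
      | false =>
        have e1 : pvCount false ('1' :: rest) = 1 + pvCount true rest := by simp [pvCount]
        rw [e1]
        exact (ih true (t + 1)).trans (by ring)
      | true =>
        have e1 : pvCount true ('1' :: rest) = pvCount true rest := by simp [pvCount]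
        rw [e1]
        exact ih true t
    · by_cases h0 : c = '0'
      · subst h0
        have e1 : pvCount b ('0' :: rest) = pvCount false rest := by
          cases b <;> simp [pvCount]
        rw [e1]
        cases b with
        | false => exact ih false t
        | true => exact ih false t
      · have e1 : pvCount b (c :: rest) = pvCount b rest := by simp [pvCount, h1, h0]
        rw [e1]
        simp only [show (c == '1') = false from by simp [h1],
          show (c == '0') = false from by simp [h0], Bool.false_and, Bool.false_eq_true,
          if_false]
        exact ih b t

-- ===== VERDICT (by name: the statement is the Claim_ definition above) =====
theorem checkOnesSegment_spec : Claim_equal_checkOnesSegment := by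
  intro s _
  unfold Spec_checkOnesSegment
  show decide ((s.toList.foldl
      (fun (st : Bool × Int) i =>
        let st1 := if i == '1' && !st.1 then (true, st.2 + 1) else st
        if i == '0' && st1.1 then (false, st1.2) else st1) (false, 0)).2 ≤ 1)
    = decide ((((PySem.Chars.splitOn s.toList ['0']).filter (fun g => PySem.Chars.isIn ['1'] g)).length) ≤ 1)
  rw [foldl_eq_pvCount, splitOn_eq_pvSplit]
  have hfi : (fun g => PySem.Chars.isIn ['1'] g) = (fun g => decide ('1' ∈ g)) := funext isIn_one
  rw [hfi]
  have hB := pvCount_filter s.toList false [] (by simp)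
  simp only [Bool.false_eq_true, if_false] at hB
  simp only [decide_eq_decide]
  omega
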